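-- pv_equiv track=rewrite | github.com/Katsutami7moto/6_password_strength | password_strength.py | simple_leet_decoding
-- ===== SOURCE A (Python) =====
-- def simple_leet_decoding(password: str) -> str:
--     leet = {
--         '0': 'o',
--         '1': 'i',
--         '2': 'z',
--         '3': 'e',
--         '4': 'a',
--         '5': 's',
--         '6': 'g',
--         '7': 't',
--         '8': 'b',
--         '9': 'q'
--     }
--     lookup = list(password)
--     for index, letter in enumerate(lookup):
--         if letter in leet:
--             lookup[index] = leet[letter]
--     return "".join(lookup)
-- ===== SOURCE B (Python) =====
-- def simple_leet_decoding(password: str) -> str: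
--     leet = {
--         '0': 'o',
--         '1': 'i',
--         '2': 'z',
--         '3': 'e',
--         '4': 'a',
--         '5': 's',
--         '6': 'g',
--         '7': 't',
--         '8': 'b',
--         '9': 'q'
--     }
--     for digit, letter in leet.items():
--         password = password.replace(digit, letter)
--     return password
-- ===== Notes on version B (the rewrite author's own statement) =====
-- stated objective: faster
-- what changed: B loops over the fixed 10-entry leet table applying one whole-string str.replace per digit, instead of A's per-character scan of a list copy with dict membership tests and index assignment; the per-character work moves from interpreted Python into str.replace.
import Mathlib
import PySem

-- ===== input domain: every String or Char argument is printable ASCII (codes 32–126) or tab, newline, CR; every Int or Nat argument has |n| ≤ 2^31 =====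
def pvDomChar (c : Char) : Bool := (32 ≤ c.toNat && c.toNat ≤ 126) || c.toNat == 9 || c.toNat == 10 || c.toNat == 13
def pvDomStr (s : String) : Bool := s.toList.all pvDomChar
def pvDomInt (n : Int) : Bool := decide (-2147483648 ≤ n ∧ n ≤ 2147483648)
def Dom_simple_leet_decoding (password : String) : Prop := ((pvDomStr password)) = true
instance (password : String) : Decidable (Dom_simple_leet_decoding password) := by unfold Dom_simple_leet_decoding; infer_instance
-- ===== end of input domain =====

-- B replaces A's per-character scan (list copy, dict membership test, index assignment)
-- by a loop over the fixed 10-entry leet table applying one whole-string replace per digit.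

-- ===== PORT A =====
-- A's leet dict
def pvLeetDict : PySem.Dict Char Char :=
  PySem.Dict.ofList
    [('0','o'),('1','i'),('2','z'),('3','e'),('4','a'),
     ('5','s'),('6','g'),('7','t'),('8','b'),('9','q')]

def simple_leet_decoding (password : String) : String :=
  let lookup := password.toList
  let lookup :=
    (PySem.List.enumerate lookup).foldl
      (fun lk p =>
        if pvLeetDict.contains p.2 then
          lk.set p.1.toNat (pvLeetDict.getD p.2 p.2)
        else lk)
      lookup
  String.ofList (PySem.Chars.join [] (lookup.map (fun c => [c])))

-- ===== PORT B =====
-- B's (digit, letter) table, iterated with str.replace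
def pvLeetTable : List (String × String) :=
  [("0","o"),("1","i"),("2","z"),("3","e"),("4","a"),
   ("5","s"),("6","g"),("7","t"),("8","b"),("9","q")]

def simple_leet_decoding_alt (password : String) : String :=
  pvLeetTable.foldl (fun pw p => PySem.Str.replace pw p.1 p.2) password

-- ===== PRECONDITION & SPEC =====
def Spec_simple_leet_decoding (password : String) (out : String) : Prop := out = simple_leet_decoding_alt password
instance (password : String) (out : String) : Decidable (Spec_simple_leet_decoding password out) := by unfold Spec_simple_leet_decoding; infer_instance

-- ===== CLAIM (what is proved, stated in full; the proofs are below) =====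
def Claim_equal_simple_leet_decoding : Prop := ∀ (password : String), Dom_simple_leet_decoding password → Spec_simple_leet_decoding password (simple_leet_decoding password)

-- ===== LEMMAS AND PROOFS =====

-- the per-character decoding function both programs realize
def pvF (c : Char) : Char := pvLeetDict.getD c c

-- single-char substitution step of one replace pass
def pvSub (d n c : Char) : Char := if c = d then n else c

lemma go_single (d n : Char) :
    ∀ (fuel : Nat) (l acc : List Char), l.length ≤ fuel →
    PySem.Chars.replace.go [d] [n] fuel l acc
      = acc.reverse ++ l.map (pvSub d n) := by
  intro fuel
  induction fuel with
  | zero =>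
      intro l acc h
      have : l = [] := List.eq_nil_of_length_eq_zero (Nat.le_zero.mp h)
      subst this
      simp [PySem.Chars.replace.go]
  | succ k ih =>
      intro l acc h
      cases l with
      | nil => simp [PySem.Chars.replace.go]
      | cons c t =>
          by_cases hc : c = d
          · subst hc
            rw [PySem.Chars.replace.go]
            simp only [List.isPrefixOf, BEq.rfl, Bool.true_and, if_true,
              List.length_cons, List.length_nil, List.drop_succ_cons, List.drop_zero]
            rw [ih t ([n].reverse ++ acc) (Nat.le_of_succ_le_succ (by simpa using h))]
            simp [pvSub]
          · rw [PySem.Chars.replace.go]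
            have hb : (d == c) = false := by
              simp [beq_eq_false_iff_ne]; exact fun e => hc e.symm
            simp only [List.isPrefixOf, hb, Bool.false_and, if_neg Bool.false_ne_true]
            rw [ih t (c :: acc) (Nat.le_of_succ_le_succ (by simpa using h))]
            simp [pvSub, hc]

lemma replace_single (d n : Char) (l : List Char) :
    PySem.Chars.replace l [d] [n] = l.map (pvSub d n) := by
  rw [PySem.Chars.replace]
  simp only [List.isEmpty_cons, if_neg Bool.false_ne_true]
  simpa using go_single d n l.length l [] (le_refl _)

-- A's in-place update loop over enumerate realizes map pvF
lemma foldl_set_enum (xs : List Char) :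
    ∀ (pre : List Char),
    (PySem.List.enumerate xs (pre.length : Int)).foldl
      (fun lk p =>
        if pvLeetDict.contains p.2 then
          lk.set p.1.toNat (pvLeetDict.getD p.2 p.2)
        else lk)
      (pre ++ xs) = pre ++ xs.map pvF := by
  induction xs with
  | nil => intro pre; simp [PySem.List.enumerate]
  | cons x t ih =>
      intro pre
      rw [PySem.List.enumerate_cons, List.foldl_cons]
      have hset : (if pvLeetDict.contains x then
            (pre ++ x :: t).set (Int.toNat (pre.length : Int)) (pvLeetDict.getD x x)
          else pre ++ x :: t) = (pre ++ [pvF x]) ++ t := by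
        by_cases hc : pvLeetDict.contains x
        · rw [if_pos hc]
          simp [pvF]
        · rw [if_neg hc]
          have : pvLeetDict.getD x x = x :=
            PySem.Dict.getD_of_not_contains pvLeetDict x (eq_false_of_ne_true hc)
          simp [pvF, this]
      rw [hset]
      have hlen : (pre.length : Int) + 1 = (((pre ++ [pvF x]).length : Nat) : Int) := by
        simp
      rw [hlen, ih (pre ++ [pvF x])]
      simp [pvF]

-- pointwise: the ten replace passes compose to pvF
lemma point (c : Char) :
    pvSub '9' 'q' (pvSub '8' 'b' (pvSub '7' 't' (pvSub '6' 'g' (pvSub '5' 's'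
      (pvSub '4' 'a' (pvSub '3' 'e' (pvSub '2' 'z' (pvSub '1' 'i' (pvSub '0' 'o' c)))))))))
      = pvF c := by
  by_cases h0 : c = '0'; · subst h0; decide
  by_cases h1 : c = '1'; · subst h1; decide
  by_cases h2 : c = '2'; · subst h2; decide
  by_cases h3 : c = '3'; · subst h3; decide
  by_cases h4 : c = '4'; · subst h4; decide
  by_cases h5 : c = '5'; · subst h5; decide
  by_cases h6 : c = '6'; · subst h6; decide
  by_cases h7 : c = '7'; · subst h7; decide
  by_cases h8 : c = '8'; · subst h8; decide
  by_cases h9 : c = '9'; · subst h9; decide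
  simp only [pvSub, if_neg h0, if_neg h1, if_neg h2, if_neg h3, if_neg h4,
    if_neg h5, if_neg h6, if_neg h7, if_neg h8, if_neg h9]
  have hmk : pvLeetDict = PySem.Dict.mk
      [('0','o'),('1','i'),('2','z'),('3','e'),('4','a'),
       ('5','s'),('6','g'),('7','t'),('8','b'),('9','q')] := by decide
  have hcont : pvLeetDict.contains c = false := by
    rw [hmk, PySem.Dict.contains_mk]
    simp [Ne.symm h0, Ne.symm h1, Ne.symm h2,
      Ne.symm h3, Ne.symm h4, Ne.symm h5, Ne.symm h6, Ne.symm h7, Ne.symm h8, Ne.symm h9]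
  rw [pvF, PySem.Dict.getD_of_not_contains pvLeetDict c hcont]

lemma alt_toList (password : String) :
    (simple_leet_decoding_alt password).toList = password.toList.map pvF := by
  unfold simple_leet_decoding_alt pvLeetTable
  simp only [List.foldl_cons, List.foldl_nil]
  simp only [PySem.Str.toList_replace,
    show ("0" : String).toList = ['0'] from rfl, show ("o" : String).toList = ['o'] from rfl,
    show ("1" : String).toList = ['1'] from rfl, show ("i" : String).toList = ['i'] from rfl,
    show ("2" : String).toList = ['2'] from rfl, show ("z" : String).toList = ['z'] from rfl,
    show ("3" : String).toList = ['3'] from rfl, show ("e" : String).toList = ['e'] from rfl,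
    show ("4" : String).toList = ['4'] from rfl, show ("a" : String).toList = ['a'] from rfl,
    show ("5" : String).toList = ['5'] from rfl, show ("s" : String).toList = ['s'] from rfl,
    show ("6" : String).toList = ['6'] from rfl, show ("g" : String).toList = ['g'] from rfl,
    show ("7" : String).toList = ['7'] from rfl, show ("t" : String).toList = ['t'] from rfl,
    show ("8" : String).toList = ['8'] from rfl, show ("b" : String).toList = ['b'] from rfl,
    show ("9" : String).toList = ['9'] from rfl, show ("q" : String).toList = ['q'] from rfl,
    replace_single, List.map_map]
  refine List.map_congr_left fun c _ => ?_
  simpa [Function.comp] using point c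

-- ===== VERDICT (by name: the statement is the Claim_ definition above) =====
theorem simple_leet_decoding_spec : Claim_equal_simple_leet_decoding := by
  intro password _
  unfold Spec_simple_leet_decoding
  apply String.ext
  rw [alt_toList]
  have hloop := foldl_set_enum password.toList []
  simp only [List.nil_append, List.length_nil, Nat.cast_zero] at hloop
  show (String.ofList (PySem.Chars.join []
      ((List.foldl
          (fun lk p =>
            if pvLeetDict.contains p.2 then
              lk.set p.1.toNat (pvLeetDict.getD p.2 p.2)
            else lk)
          password.toList (PySem.List.enumerate password.toList 0)).map
        (fun c => [c])))).toList = List.map pvF password.toList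
  rw [String.toList_ofList, hloop, PySem.Chars.join_nil_singletons]
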